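-- pv_equiv track=rewrite | github.com/prefeitura-rio/vision-ai | projects/streamlit/app/utils/utils.py | get_identifications_index
-- ===== SOURCE A (Python) =====
-- def get_identifications_index(identifications: list, fake_index: int):
--     identifications_snapshots_to_index = {}
--     current_index = 1
--     cycle = 1
--     for identification in identifications:
--         url = identification["snapshot"]["image_url"]
--         if url not in identifications_snapshots_to_index:
--             identifications_snapshots_to_index[url] = {
--                 "index": current_index,
--                 "total": fake_index,
--                 "cycle": cycle,
--             }
--             if current_index == fake_index:
--                 cycle += 1
--             current_index = (current_index % fake_index) + 1  # Cycle through numbers until N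
--
--     last_cycle = identifications_snapshots_to_index[
--         list(identifications_snapshots_to_index.keys())[-1]
--     ]["cycle"]
--     for url in identifications_snapshots_to_index.keys():
--         if identifications_snapshots_to_index[url]["cycle"] == last_cycle:
--             identifications_snapshots_to_index[url]["total"] = (
--                 len(identifications_snapshots_to_index) % fake_index
--             )
--     return identifications_snapshots_to_index
-- ===== SOURCE B (Python) =====
-- def get_identifications_index(identifications: list, fake_index: int):
--     seen = set()
--     urls = []
--     for identification in identifications:
--         url = identification["snapshot"]["image_url"]
--         if url not in seen:
--             seen.add(url)
--             urls.append(url)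
--     n = len(urls)
--     last_cycle = (n - 1) // fake_index + 1 if fake_index > 0 else 1
--     result = {}
--     for i, url in enumerate(urls):
--         cycle = i // fake_index + 1 if fake_index > 0 else 1
--         total = n % fake_index if cycle == last_cycle else fake_index
--         result[url] = {"index": i % fake_index + 1, "total": total, "cycle": cycle}
--     return result
-- ===== Notes on version B (the rewrite author's own statement) =====
-- stated objective: simpler
-- what changed: A threads stateful current_index/cycle counters through the dedup loop and then patches 'total' by a second in-place pass over the dict; B first collects the unique URLs in one dedup pass and then builds each entry directly by closed form (index = i % fake_index + 1, cycle = i // fake_index + 1 for positive fake_index, else 1), computing the last cycle and each total arithmetically with no mutation pass.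
import Mathlib
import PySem

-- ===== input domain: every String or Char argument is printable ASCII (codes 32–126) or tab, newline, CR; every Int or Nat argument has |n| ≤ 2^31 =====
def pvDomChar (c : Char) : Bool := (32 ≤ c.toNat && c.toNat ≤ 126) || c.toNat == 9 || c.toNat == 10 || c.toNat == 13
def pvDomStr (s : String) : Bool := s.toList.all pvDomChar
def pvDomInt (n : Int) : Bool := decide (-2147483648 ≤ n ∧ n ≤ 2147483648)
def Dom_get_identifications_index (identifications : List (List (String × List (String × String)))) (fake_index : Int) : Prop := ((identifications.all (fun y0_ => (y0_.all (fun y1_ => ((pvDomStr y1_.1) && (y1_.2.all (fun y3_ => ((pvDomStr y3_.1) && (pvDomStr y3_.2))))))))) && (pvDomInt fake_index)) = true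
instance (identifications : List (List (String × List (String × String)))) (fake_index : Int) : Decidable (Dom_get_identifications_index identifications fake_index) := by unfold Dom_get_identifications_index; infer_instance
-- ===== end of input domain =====

-- B replaces A's stateful index/cycle counters and in-place total-patching pass over the dict
-- by a one-pass dedup followed by a direct closed-form construction (index/cycle/total computed
-- from the position alone); objective: simpler (equal asymptotic cost).

-- shared helper: both Pythons evaluate identification["snapshot"]["image_url"]
def pvExtractUrl (ident : List (String × List (String × String))) : Option String :=
  ((PySem.Dict.mk ident).get? "snapshot").bind (fun d => (PySem.Dict.mk d).get? "image_url")

-- ===== PORT A =====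
def pvAStep (f : Int)
    (st : PySem.Dict String (PySem.Dict String Int) × Int × Int)
    (ident : List (String × List (String × String))) :
    PySem.Dict String (PySem.Dict String Int) × Int × Int :=
  match pvExtractUrl ident with
  | none => st          -- Python raises KeyError here; excluded by Pre_
  | some url =>
    if st.1.contains url then st
    else
      let m := st.1.insert url (PySem.Dict.mk [("index", st.2.1), ("total", f), ("cycle", st.2.2)])
      let cyc := if st.2.1 = f then st.2.2 + 1 else st.2.2
      (m, PySem.Int.mod st.2.1 f + 1, cyc)   -- f = 0 would be ZeroDivisionError; excluded by Pre_

def get_identifications_index (identifications : List (List (String × List (String × String)))) (fake_index : Int) : List (String × List (String × Int)) :=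
  let st := identifications.foldl (pvAStep fake_index) (PySem.Dict.empty, 1, 1)
  match PySem.List.pyGet? st.1.keys (-1) with
  | none => []          -- Python raises IndexError (empty dict); excluded by Pre_
  | some lastUrl =>
    -- the keys looked up below are always present, so getD is exact here
    let last_cycle := (st.1.getD lastUrl PySem.Dict.empty).getD "cycle" 0
    let final := st.1.keys.foldl (fun d url =>
      if (d.getD url PySem.Dict.empty).getD "cycle" 0 = last_cycle then
        d.modify url PySem.Dict.empty
          (fun v => v.insert "total" (PySem.Int.mod (d.size : Int) fake_index))
      else d) st.1
    final.items.map (fun p => (p.1, p.2.items))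

-- ===== PORT B =====
def get_identifications_index_alt (identifications : List (List (String × List (String × String)))) (fake_index : Int) : List (String × List (String × Int)) :=
  let p := identifications.foldl (fun (st : PySem.Set String × List String) ident =>
      match pvExtractUrl ident with
      | none => st      -- Python raises KeyError here; excluded by Pre_
      | some url =>
        if st.1.contains url then st else (st.1.add url, st.2 ++ [url]))
    (PySem.Set.empty, [])
  let n : Int := p.2.length
  let last_cycle : Int := if fake_index > 0 then PySem.Int.floordiv (n - 1) fake_index + 1 else 1
  let result := (PySem.List.enumerate p.2 0).foldl (fun d q =>
      let cyc : Int := if fake_index > 0 then PySem.Int.floordiv q.1 fake_index + 1 else 1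
      let total : Int := if cyc = last_cycle then PySem.Int.mod n fake_index else fake_index
      d.insert q.2 (PySem.Dict.mk [("index", PySem.Int.mod q.1 fake_index + 1), ("total", total), ("cycle", cyc)]))
    (PySem.Dict.empty : PySem.Dict String (PySem.Dict String Int))
  result.items.map (fun q => (q.1, q.2.items))

-- ===== PRECONDITION & SPEC =====
-- Pre_ excludes exactly the inputs where A raises: an empty identification list (IndexError on
-- keys()[-1]), fake_index = 0 (ZeroDivisionError), and identifications missing the
-- "snapshot"/"image_url" keys (KeyError).
def Pre_get_identifications_index (identifications : List (List (String × List (String × String)))) (fake_index : Int) : Prop :=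
  identifications ≠ [] ∧ fake_index ≠ 0 ∧
    ∀ ident ∈ identifications, (pvExtractUrl ident).isSome = true
instance (identifications : List (List (String × List (String × String)))) (fake_index : Int) : Decidable (Pre_get_identifications_index identifications fake_index) := by unfold Pre_get_identifications_index; infer_instance

def pvWitness_get_identifications_index : (List (List (String × List (String × String)))) × Int :=
  ([[("snapshot", [("image_url", "u1")])], [("snapshot", [("image_url", "u2")])]], 2)

def Spec_get_identifications_index (identifications : List (List (String × List (String × String)))) (fake_index : Int) (out : List (String × List (String × Int))) : Prop := out = get_identifications_index_alt identifications fake_index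
instance (identifications : List (List (String × List (String × String)))) (fake_index : Int) (out : List (String × List (String × Int))) : Decidable (Spec_get_identifications_index identifications fake_index out) := by unfold Spec_get_identifications_index; infer_instance

-- ===== CLAIM (what is proved, stated in full; the proofs are below) =====
def Claim_equal_get_identifications_index : Prop := ∀ (identifications : List (List (String × List (String × String)))) (fake_index : Int), Dom_get_identifications_index identifications fake_index → Pre_get_identifications_index identifications fake_index → Spec_get_identifications_index identifications fake_index (get_identifications_index identifications fake_index)

-- ===== LEMMAS AND PROOFS =====

-- closed forms for A's carried counters after k unique insertions
def pvCycF (f i : Int) : Int := if f > 0 then PySem.Int.floordiv i f + 1 else 1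

def pvEntryRaw (f i : Int) : PySem.Dict String Int :=
  PySem.Dict.mk [("index", PySem.Int.mod i f + 1), ("total", f), ("cycle", pvCycF f i)]

def pvMkA (f : Int) (U : List String) : PySem.Dict String (PySem.Dict String Int) :=
  (PySem.List.enumerate U 0).foldl (fun d q => d.insert q.2 (pvEntryRaw f q.1)) PySem.Dict.empty

-- A's first-loop body once the url is extracted
def pvACore (f : Int)
    (st : PySem.Dict String (PySem.Dict String Int) × Int × Int) (url : String) :
    PySem.Dict String (PySem.Dict String Int) × Int × Int :=
  if st.1.contains url then st
  else
    let m := st.1.insert url (PySem.Dict.mk [("index", st.2.1), ("total", f), ("cycle", st.2.2)])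
    let cyc := if st.2.1 = f then st.2.2 + 1 else st.2.2
    (m, PySem.Int.mod st.2.1 f + 1, cyc)

-- A's second-loop body
def pvPStep (f last : Int) (d : PySem.Dict String (PySem.Dict String Int)) (url : String) :
    PySem.Dict String (PySem.Dict String Int) :=
  if (d.getD url PySem.Dict.empty).getD "cycle" 0 = last then
    d.modify url PySem.Dict.empty (fun v => v.insert "total" (PySem.Int.mod (d.size : Int) f))
  else d

lemma pvFoldA (f : Int) (ids : List (List (String × List (String × String))))
    (st : PySem.Dict String (PySem.Dict String Int) × Int × Int) :
    ids.foldl (pvAStep f) st = (ids.filterMap pvExtractUrl).foldl (pvACore f) st := by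
  induction ids generalizing st with
  | nil => rfl
  | cons a ids ih =>
    cases h : pvExtractUrl a with
    | none => simp [List.foldl_cons, h, pvAStep, ih]
    | some u => simp [List.foldl_cons, h, pvAStep, pvACore, ih]

lemma pvFoldB (ids : List (List (String × List (String × String))))
    (st : PySem.Set String × List String) :
    ids.foldl (fun (st : PySem.Set String × List String) ident =>
      match pvExtractUrl ident with
      | none => st
      | some url => if st.1.contains url then st else (st.1.add url, st.2 ++ [url])) st
    = (ids.filterMap pvExtractUrl).foldl
        (fun st url => if st.1.contains url then st else (st.1.add url, st.2 ++ [url])) st := by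
  induction ids generalizing st with
  | nil => rfl
  | cons a ids ih =>
    cases h : pvExtractUrl a with
    | none => simp only [List.foldl_cons, List.filterMap_cons, h]; exact ih _
    | some u => simp only [List.foldl_cons, List.filterMap_cons, h]; exact ih _

lemma pvB1 (us : List String) (s : PySem.Set String) :
    us.foldl (fun (st : PySem.Set String × List String) url =>
        if st.1.contains url then st else (st.1.add url, st.2 ++ [url])) (s, s)
    = (PySem.Set.update s us, PySem.Set.update s us) := by
  induction us generalizing s with
  | nil => simp [PySem.Set.update]
  | cons u us ih =>
    rw [List.foldl_cons, PySem.Set.update_cons]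
    have hstep : (if s.contains u = true then ((s, s) : PySem.Set String × List String)
        else (s.add u, s ++ [u])) = (s.add u, s.add u) := by
      by_cases hm : u ∈ s
      · rw [if_pos ((PySem.Set.contains_iff s u).2 hm), PySem.Set.add_of_mem hm]
      · rw [if_neg (by simp [hm]), PySem.Set.add_of_not_mem hm]
    show List.foldl _ (if s.contains u = true then (s, s) else (s.add u, s ++ [u])) us = _
    rw [hstep]
    exact ih (s.add u)

lemma pvModAddMul {f : Int} (hf : f ≠ 0) (a c : Int) :
    PySem.Int.mod (a + c * f) f = PySem.Int.mod a f := by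
  rcases lt_or_gt_of_ne hf with hneg | hpos
  · have hpos' : (0 : Int) < -f := by omega
    have key : PySem.Int.mod (-(a + c * f)) (-f) = PySem.Int.mod (-a) (-f) := by
      have h : -(a + c * f) = -a + c * (-f) := by ring
      rw [h, PySem.Int.mod_eq_emod_of_pos hpos', PySem.Int.mod_eq_emod_of_pos hpos',
        Int.add_mul_emod_self_right]
    have e1 := PySem.Int.mod_neg_neg (-(a + c * f)) (-f)
    have e2 := PySem.Int.mod_neg_neg (-a) (-f)
    simp only [neg_neg] at e1 e2
    rw [e1, e2, key]
  · rw [PySem.Int.mod_eq_emod_of_pos hpos, PySem.Int.mod_eq_emod_of_pos hpos,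
      Int.add_mul_emod_self_right]

lemma pvIdxStep {f : Int} (hf : f ≠ 0) (k : Int) :
    PySem.Int.mod (PySem.Int.mod k f + 1) f = PySem.Int.mod (k + 1) f := by
  have h := PySem.Int.floordiv_mul_add_mod k f
  have h2 : PySem.Int.mod k f + 1 = (k + 1) + (-(PySem.Int.floordiv k f)) * f := by
    rw [neg_mul]; linarith [h]
  rw [h2, pvModAddMul hf]

lemma pvCycStep {f : Int} (hf : f ≠ 0) (k : Int) :
    (if PySem.Int.mod k f + 1 = f then pvCycF f k + 1 else pvCycF f k) = pvCycF f (k + 1) := by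
  rcases lt_or_gt_of_ne hf with hneg | hpos
  · obtain ⟨hb1, hb2⟩ := PySem.Int.mod_neg_bounds k hneg
    have hne : ¬ (PySem.Int.mod k f + 1 = f) := by omega
    have hnpos : ¬ (f > 0) := by omega
    simp [pvCycF, hne, hnpos]
  · have hq := Int.emod_add_ediv k f
    have hr0 : 0 ≤ k % f := Int.emod_nonneg k hf
    have hrf : k % f < f := Int.emod_lt_of_pos k hpos
    have hmod : PySem.Int.mod k f = k % f := PySem.Int.mod_eq_emod_of_pos hpos
    have hdiv1 : PySem.Int.floordiv (k + 1) f = (k + 1) / f := PySem.Int.floordiv_eq_ediv_of_pos hpos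
    have hdivk : PySem.Int.floordiv k f = k / f := PySem.Int.floordiv_eq_ediv_of_pos hpos
    have hksplit : k + 1 = (k % f + 1) + (k / f) * f := by linarith [hq]
    have hstep : (k + 1) / f = (k % f + 1) / f + k / f := by
      rw [hksplit, Int.add_mul_ediv_right _ _ hf]
    simp only [pvCycF, hpos, if_pos, hmod, hdiv1, hdivk]
    by_cases hcase : k % f + 1 = f
    · have h1 : (k % f + 1) / f = 1 := by rw [hcase]; exact Int.ediv_self hf
      rw [if_pos hcase]; omega
    · have h0 : (k % f + 1) / f = 0 := Int.ediv_eq_zero_of_lt (by omega) (by omega)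
      rw [if_neg hcase]; omega

lemma pvMkA_items {f : Int} (U : List String) (hU : U.Nodup) :
    (pvMkA f U).items = (PySem.List.enumerate U 0).map (fun q => (q.2, pvEntryRaw f q.1)) := by
  have h := PySem.Dict.items_foldl_insert_fresh (PySem.List.enumerate U 0)
    (fun q => q.2) (fun q => pvEntryRaw f q.1) PySem.Dict.empty
    (by intro a _; simp [PySem.Dict.contains_empty])
    (by rw [show (fun (q : Int × String) => q.2) = (fun (q : Int × String) => q.2) from rfl]
        simpa [PySem.List.map_snd_enumerate] using hU)
  simpa [pvMkA, PySem.Dict.items, PySem.Dict.empty] using h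

lemma pvMkA_keys {f : Int} (U : List String) (hU : U.Nodup) :
    (pvMkA f U).keys = U := by
  have h := pvMkA_items (f := f) U hU
  simp only [PySem.Dict.keys, h, List.map_map]
  have hc : ((fun p : String × PySem.Dict String Int => p.1) ∘
      (fun q : Int × String => (q.2, pvEntryRaw f q.1))) = (fun q : Int × String => q.2) := rfl
  rw [hc]
  exact PySem.List.map_snd_enumerate U 0

lemma pvMkA_snoc (f : Int) (U : List String) (u : String) :
    pvMkA f (U ++ [u]) = (pvMkA f U).insert u (pvEntryRaw f (U.length : Int)) := by
  simp [pvMkA, PySem.List.enumerate_append, List.foldl_append]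

lemma pvAFold {f : Int} (hf : f ≠ 0) (us : List String) :
    ∀ (U : List String), U.Nodup →
    us.foldl (pvACore f) (pvMkA f U, PySem.Int.mod (U.length : Int) f + 1, pvCycF f (U.length : Int))
    = (pvMkA f (PySem.Set.update U us),
       PySem.Int.mod ((PySem.Set.update U us).length : Int) f + 1,
       pvCycF f ((PySem.Set.update U us).length : Int)) := by
  induction us with
  | nil => intro U hU; simp [PySem.Set.update]
  | cons u us ih =>
    intro U hU
    rw [List.foldl_cons, PySem.Set.update_cons]
    by_cases hu : u ∈ U
    · have hc : (pvMkA f U).contains u = true := by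
        rw [PySem.Dict.contains_eq_decide_mem_keys, pvMkA_keys U hU]; simpa using hu
      have hadd : PySem.Set.add U u = U := PySem.Set.add_of_mem hu
      rw [show pvACore f (pvMkA f U, PySem.Int.mod (U.length : Int) f + 1, pvCycF f (U.length : Int)) u
            = (pvMkA f U, PySem.Int.mod (U.length : Int) f + 1, pvCycF f (U.length : Int)) by
          simp [pvACore, hc], hadd]
      exact ih U hU
    · have hc : (pvMkA f U).contains u = false := by
        rw [PySem.Dict.contains_eq_decide_mem_keys, pvMkA_keys U hU]; simpa using hu
      have hadd : PySem.Set.add U u = U ++ [u] := PySem.Set.add_of_not_mem hu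
      have hlen : (((U ++ [u]).length : Nat) : Int) = (U.length : Int) + 1 := by
        simp
      have hstep : pvACore f (pvMkA f U, PySem.Int.mod (U.length : Int) f + 1, pvCycF f (U.length : Int)) u
          = (pvMkA f (U ++ [u]), PySem.Int.mod ((U ++ [u]).length : Int) f + 1,
             pvCycF f ((U ++ [u]).length : Int)) := by
        simp only [pvACore, hc, Bool.false_eq_true, if_false]
        rw [hlen, pvMkA_snoc, pvIdxStep hf, pvCycStep hf]
        rfl
      rw [hstep, hadd]
      exact ih (U ++ [u]) (hU.append (List.nodup_singleton u)
        (by intro a ha hb; rw [List.mem_singleton] at hb; exact hu (hb ▸ ha)))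

lemma pvPatchFold (f last : Int) :
    ∀ (ks : List String) (d : PySem.Dict String (PySem.Dict String Int)),
    ks.Nodup → d.keys.Nodup → (∀ k ∈ ks, d.contains k = true) →
    (ks.foldl (pvPStep f last) d).items
    = d.items.map (fun p =>
        if p.1 ∈ ks ∧ p.2.getD "cycle" 0 = last
        then (p.1, p.2.insert "total" (PySem.Int.mod (d.size : Int) f)) else p) := by
  intro ks
  induction ks with
  | nil => intro d _ _ _; simp
  | cons k ks ih =>
    intro d hks hkeys hcont
    have hkd : d.contains k = true := hcont k (by simp)
    have hknotks : k ∉ ks := (List.nodup_cons.1 hks).1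
    have hksnd : ks.Nodup := (List.nodup_cons.1 hks).2
    rw [List.foldl_cons]
    by_cases hcv : (d.getD k PySem.Dict.empty).getD "cycle" 0 = last
    · have hstep : pvPStep f last d k
          = d.insert k ((d.getD k PySem.Dict.empty).insert "total"
              (PySem.Int.mod (d.size : Int) f)) := by
        unfold pvPStep PySem.Dict.modify
        rw [if_pos hcv]
      set w := (d.getD k PySem.Dict.empty).insert "total" (PySem.Int.mod (d.size : Int) f) with hw
      have hitems1 : (d.insert k w).items
          = d.items.map (fun p => if p.1 == k then (k, w) else p) :=
        PySem.Dict.items_insert_of_contains d _ hkd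
      have hsize1 : (d.insert k w).size = d.size := by
        simp [PySem.Dict.size, hitems1]
      have hkeys1 : (d.insert k w).keys = d.keys :=
        PySem.Dict.keys_insert_of_contains d _ hkd
      have hcont1 : ∀ k' ∈ ks, (d.insert k w).contains k' = true := by
        intro k' hk'
        rw [PySem.Dict.contains_insert]
        simp [hcont k' (by simp [hk'])]
      rw [hstep, ih _ hksnd (by rw [hkeys1]; exact hkeys) hcont1, hsize1, hitems1, List.map_map]
      apply List.map_congr_left
      intro p hp
      have hpv : p.1 = k → p.2 = d.getD k PySem.Dict.empty := by
        intro hpk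
        have hg : d.get? p.1 = some p.2 :=
          PySem.Dict.get?_of_mem_items d (by simpa using hp) hkeys
        rw [← hpk]
        exact (PySem.Dict.getD_of_get?_eq_some d _ hg).symm
      simp only [Function.comp_apply, beq_iff_eq, List.mem_cons]
      split_ifs with h1 h2 h3 h4 h5 h6 <;> simp_all
    · have hstep : pvPStep f last d k = d := by
        unfold pvPStep
        rw [if_neg hcv]
      rw [hstep, ih _ hksnd hkeys (fun k' hk' => hcont k' (by simp [hk']))]
      apply List.map_congr_left
      intro p hp
      have hpv : p.1 = k → p.2 = d.getD k PySem.Dict.empty := by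
        intro hpk
        have hg : d.get? p.1 = some p.2 :=
          PySem.Dict.get?_of_mem_items d (by simpa using hp) hkeys
        rw [← hpk]
        exact (PySem.Dict.getD_of_get?_eq_some d _ hg).symm
      simp only [List.mem_cons]
      split_ifs with h1 h2 <;> simp_all

lemma pvPyGetLast {α : Type} (W : List α) (u : α) :
    PySem.List.pyGet? (W ++ [u]) (-1) = some u := by
  unfold PySem.List.pyGet? PySem.List.pyIdx?
  rw [if_neg (by norm_num), if_pos (by simp)]
  have h : (W ++ [u]).length - (-(-1 : Int)).toNat = W.length := by simp
  rw [h]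
  simp

lemma pvEntryCycle (f i : Int) : (pvEntryRaw f i).getD "cycle" 0 = pvCycF f i := by
  simp [pvEntryRaw, PySem.Dict.getD_eq_get?_getD, PySem.Dict.get?_mk_cons]

lemma pvEntryInsertTotal (f i t : Int) :
    (pvEntryRaw f i).insert "total" t
    = PySem.Dict.mk [("index", PySem.Int.mod i f + 1), ("total", t), ("cycle", pvCycF f i)] := by
  simp [pvEntryRaw, PySem.Dict.insert]

-- ===== VERDICT (by name: the statement is the Claim_ definition above) =====
theorem get_identifications_index_spec : Claim_equal_get_identifications_index := by
  intro ids f _ hpre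
  obtain ⟨hne, hf, hall⟩ := hpre
  unfold Spec_get_identifications_index
  have husne : ids.filterMap pvExtractUrl ≠ [] := by
    cases ids with
    | nil => exact absurd rfl hne
    | cons a t =>
      have h1 := hall a (by simp)
      cases h : pvExtractUrl a with
      | none => rw [h] at h1; simp at h1
      | some u => simp [h]
  set us := ids.filterMap pvExtractUrl with hus
  set V := PySem.Set.ofList us with hVdef
  have hVnd : V.Nodup := PySem.Set.nodup_ofList us
  have hVne : V ≠ [] := by
    cases hu : us with
    | nil => exact absurd hu husne
    | cons u t =>
      intro hcontr
      have hm : u ∈ V := by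
        rw [hVdef, hu]
        exact (PySem.Set.mem_ofList _ _).2 (by simp)
      rw [hcontr] at hm
      simp at hm
  obtain ⟨W, u, hWu⟩ : ∃ W u, V = W ++ [u] := by
    rcases List.eq_nil_or_concat V with h | ⟨W, u, h⟩
    · exact absurd h hVne
    · exact ⟨W, u, by simpa [List.concat_eq_append] using h⟩
  have hWlen : ((V.length : Nat) : Int) - 1 = (W.length : Int) := by
    rw [hWu]; simp
  -- A's first loop
  have hinit : ((PySem.Dict.empty : PySem.Dict String (PySem.Dict String Int)), (1:Int), (1:Int))
      = (pvMkA f ([] : List String),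
         PySem.Int.mod ((([] : List String).length : Int)) f + 1,
         pvCycF f (([] : List String).length : Int)) := by
    simp [pvMkA, pvCycF, PySem.Int.mod, PySem.Int.floordiv, Int.zero_fmod, Int.zero_fdiv,
      PySem.List.enumerate]
  have hA1 : ids.foldl (pvAStep f) (PySem.Dict.empty, 1, 1)
      = (pvMkA f V, PySem.Int.mod (V.length : Int) f + 1, pvCycF f (V.length : Int)) := by
    rw [pvFoldA, hinit, pvAFold hf us [] List.nodup_nil, PySem.Set.update_nil_left]
  -- keys and last entry of A's dict
  have hkeys : (pvMkA f V).keys = V := pvMkA_keys V hVnd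
  have hkeysnd : (pvMkA f V).keys.Nodup := by rw [hkeys]; exact hVnd
  have hlastkey : PySem.List.pyGet? (pvMkA f V).keys (-1) = some u := by
    rw [hkeys, hWu]; exact pvPyGetLast W u
  have hmem : (u, pvEntryRaw f (W.length : Int)) ∈ (pvMkA f V).items := by
    rw [pvMkA_items V hVnd, hWu, PySem.List.enumerate_append]
    simp
  have hgetu : (pvMkA f V).getD u PySem.Dict.empty = pvEntryRaw f (W.length : Int) :=
    PySem.Dict.getD_of_get?_eq_some _ _ (PySem.Dict.get?_of_mem_items _ hmem hkeysnd)
  have hlast : ((pvMkA f V).getD u PySem.Dict.empty).getD "cycle" 0 = pvCycF f (W.length : Int) := by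
    rw [hgetu, pvEntryCycle]
  -- A's dict size
  have hsize : ((pvMkA f V).size : Int) = (V.length : Int) := by
    simp [PySem.Dict.size, pvMkA_items V hVnd, PySem.List.length_enumerate]
  -- A's second loop
  have hcontall : ∀ k ∈ V, (pvMkA f V).contains k = true := by
    intro k hk
    rw [PySem.Dict.contains_eq_decide_mem_keys, hkeys]
    simpa using hk
  have hpatch := pvPatchFold f (pvCycF f (W.length : Int)) V (pvMkA f V) hVnd hkeysnd hcontall
  -- B's first loop
  have hB1 : ids.foldl (fun (st : PySem.Set String × List String) ident =>
      match pvExtractUrl ident with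
      | none => st
      | some url => if st.1.contains url then st else (st.1.add url, st.2 ++ [url]))
      (PySem.Set.empty, []) = (V, V) := by
    rw [pvFoldB]
    have : (PySem.Set.empty, ([] : List String)) = (([] : PySem.Set String), ([] : List String)) := rfl
    rw [this, pvB1, PySem.Set.update_nil_left]
  -- unfold both ports
  show _ = _
  unfold get_identifications_index get_identifications_index_alt
  rw [hA1, hB1]
  simp only [hlastkey]
  rw [hlast]
  -- identify the patch loop with pvPStep and apply hpatch
  have hpl : V.foldl (fun d url =>
      if (d.getD url PySem.Dict.empty).getD "cycle" 0 = pvCycF f (W.length : Int) then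
        d.modify url PySem.Dict.empty
          (fun v => v.insert "total" (PySem.Int.mod (d.size : Int) f))
      else d) (pvMkA f V)
      = V.foldl (pvPStep f (pvCycF f (W.length : Int))) (pvMkA f V) := rfl
  rw [hkeys, hpl, hpatch, hsize]
  -- B's result dict items
  have hfresh := PySem.Dict.items_foldl_insert_fresh (PySem.List.enumerate V 0)
    (fun q => q.2)
    (fun q => (PySem.Dict.mk [("index", PySem.Int.mod q.1 f + 1),
      ("total", if (if f > 0 then PySem.Int.floordiv q.1 f + 1 else 1)
                  = (if f > 0 then PySem.Int.floordiv ((V.length : Int) - 1) f + 1 else 1)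
                then PySem.Int.mod (V.length : Int) f else f),
      ("cycle", if f > 0 then PySem.Int.floordiv q.1 f + 1 else 1)]))
    PySem.Dict.empty
    (by intro a _; simp [PySem.Dict.contains_empty])
    (by simpa [PySem.List.map_snd_enumerate] using hVnd)
  rw [pvMkA_items V hVnd]
  rw [show (PySem.Dict.empty : PySem.Dict String (PySem.Dict String Int)).items = [] from rfl] at hfresh
  rw [hfresh]
  simp only [List.nil_append, List.map_map]
  apply List.map_congr_left
  intro q hq
  have hq2 : q.2 ∈ V := by
    rcases (PySem.List.mem_enumerate_iff V 0 q).1 hq with ⟨k, hk, rfl⟩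
    simp
  have hlastB : (if f > 0 then PySem.Int.floordiv ((V.length : Int) - 1) f + 1 else 1)
      = pvCycF f (W.length : Int) := by
    rw [← hWlen]; rfl
  simp only [Function.comp_apply, hlastB]
  by_cases hcy : pvCycF f q.1 = pvCycF f (W.length : Int)
  · rw [if_pos ⟨hq2, by rw [pvEntryCycle]; exact hcy⟩]
    have : (if pvCycF f q.1 = pvCycF f (W.length : Int)
        then PySem.Int.mod (V.length : Int) f else f) = PySem.Int.mod (V.length : Int) f :=
      if_pos hcy
    rw [pvEntryInsertTotal]
    simp only [pvCycF] at hcy ⊢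
    rw [if_pos hcy]
  · rw [if_neg (by rintro ⟨_, hc⟩; rw [pvEntryCycle] at hc; exact hcy hc)]
    simp only [pvCycF] at hcy ⊢
    rw [if_neg hcy]
    rfl
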